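-- pv_equiv track=rewrite | github.com/dawoonykim/python_dowoonyKim | 24.12.09/programmers_codingtest26.py | solution
-- ===== SOURCE A (Python) =====
-- def solution(myString):
--     answer = ''
--     li = list(myString)
--     for i in range(len(myString)):
--         if ord(li[i]) < ord("l"):
--             li[i] = li[i].replace(li[i], "l")
--     answer = "".join(li)
--
--     return answer
-- ===== SOURCE B (Python) =====
-- def solution(myString):
--     # Run-length chunking: split the string into maximal runs of chars below 'l'
--     # and runs of chars at or above 'l'; emit 'l' * len(run) for a low run and the
--     # run itself (a slice of the input) for a high run, then join the chunks.
--     cs = list(myString)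
--     out = []
--     while cs:
--         low = cs[0] < 'l'
--         m = 0
--         while m < len(cs) - 1 and (cs[m + 1] < 'l') == low:
--             m += 1
--         out.append('l' * (1 + m) if low else ''.join(cs[:1 + m]))
--         cs = cs[1 + m:]
--     return ''.join(out)
-- ===== Notes on version B (the rewrite author's own statement) =====
-- stated objective: alternative
-- what changed: Replaces A's per-index loop that rewrites each low character in place by a run-length chunking pass: the string is split into maximal runs of chars below / at-or-above 'l', each low run is emitted as 'l' * length and each high run copied verbatim, and the chunks are joined.
import Mathlib
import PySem

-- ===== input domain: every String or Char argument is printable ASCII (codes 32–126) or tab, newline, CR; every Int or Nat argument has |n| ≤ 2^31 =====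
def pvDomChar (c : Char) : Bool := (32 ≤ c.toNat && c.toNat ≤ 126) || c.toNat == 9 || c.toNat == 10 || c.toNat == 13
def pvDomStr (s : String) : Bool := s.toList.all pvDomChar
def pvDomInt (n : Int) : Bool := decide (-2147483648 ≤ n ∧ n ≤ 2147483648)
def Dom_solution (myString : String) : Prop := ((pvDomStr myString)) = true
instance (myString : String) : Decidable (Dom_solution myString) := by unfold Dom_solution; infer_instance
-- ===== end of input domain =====

-- B replaces A's per-index loop with run-length chunking: the string is cut into maximal
-- runs below / at-or-above 'l'; a low run becomes 'l' * len, a high run is copied verbatim (alternative decomposition, same cost).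

-- ===== PORT A =====
-- list(myString) yields one-char strings; li[i].replace(li[i], "l") on a one-char string
-- is exactly "l", so the element update is ported as setting the char to 'l' (exact).
def solution (myString : String) : String :=
  let li := myString.toList
  let li' := (PySem.List.pyRange 0 (PySem.Str.len myString) 1).foldl
    (fun l i =>
      if (PySem.List.pyGetD l i ' ').toNat < ('l').toNat then
        PySem.List.pySetD l i 'l'
      else l) li
  String.ofList li'

-- ===== PORT B =====
-- Source B's inner while: m counts how many further chars continue the current run
-- (Python's `c < 'l'` on single chars is the codepoint comparison c.toNat < 108 — exact).
def pvRunLen (low : Bool) : List Char → Nat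
  | [] => 0
  | c :: cs => if (decide (c.toNat < 108)) == low then 1 + pvRunLen low cs else 0

-- Source B's outer while over the remaining list cs: emit one chunk per run, then drop the run;
-- ''.join of the chunk strings is concatenation of their characters (exact).
def pvChunks : List Char → List Char
  | [] => []
  | c :: cs =>
    let low := decide (c.toNat < 108)
    let m := pvRunLen low cs
    (if low then List.replicate (1 + m) 'l' else c :: cs.take m) ++ pvChunks (cs.drop m)
termination_by cs => cs.length
decreasing_by simp only [List.length_drop, List.length_cons]; omega

def solution_alt (myString : String) : String :=
  String.ofList (pvChunks myString.toList)

-- ===== PRECONDITION & SPEC =====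
def Spec_solution (myString : String) (out : String) : Prop := out = solution_alt myString
instance (myString : String) (out : String) : Decidable (Spec_solution myString out) := by unfold Spec_solution; infer_instance

-- ===== CLAIM (what is proved, stated in full; the proofs are below) =====
def Claim_equal_solution : Prop := ∀ (myString : String), Dom_solution myString → Spec_solution myString (solution myString)

-- ===== LEMMAS AND PROOFS =====

-- the pointwise transformation both programs compute
def pvG (c : Char) : Char := if c.toNat < 108 then 'l' else c

lemma pv_loopA (suf p : List Char) :
    (PySem.List.pyRange (p.length : Int) (((p ++ suf).length : Nat) : Int) 1).foldl
      (fun l i =>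
        if (PySem.List.pyGetD l i ' ').toNat < ('l').toNat then
          PySem.List.pySetD l i 'l'
        else l) (p ++ suf) = p ++ suf.map pvG := by
  induction suf generalizing p with
  | nil =>
    rw [List.append_nil, PySem.List.pyRange_one_eq_nil (le_refl _)]
    simp
  | cons c cs ih =>
    rw [PySem.List.pyRange_one_cons (by push_cast; simp)]
    simp only [List.foldl_cons]
    have hget : (PySem.List.pyGetD (p ++ c :: cs) (p.length : Int) ' ') = c := by
      simp [PySem.List.pyGetD_natCast, List.getD, List.getElem?_append_right (le_refl p.length)]
    have hset : PySem.List.pySetD (p ++ c :: cs) (p.length : Int) 'l' = p ++ 'l' :: cs := by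
      simp [PySem.List.pySetD_natCast, List.set_append]
    have hl : ('l').toNat = 108 := rfl
    have hstep : (if (PySem.List.pyGetD (p ++ c :: cs) (p.length : Int) ' ').toNat < ('l').toNat
        then PySem.List.pySetD (p ++ c :: cs) (p.length : Int) 'l' else (p ++ c :: cs))
        = (p ++ [pvG c]) ++ cs := by
      rw [hget, hl]
      by_cases h : c.toNat < 108
      · rw [if_pos h, hset, show pvG c = 'l' from by unfold pvG; rw [if_pos h]]
        simp
      · rw [if_neg h, show pvG c = c from by unfold pvG; rw [if_neg h]]
        simp
    rw [hstep]
    have e1 : (p.length : Int) + 1 = (((p ++ [pvG c]).length : Nat) : Int) := by push_cast; simp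
    have e2 : (((p ++ c :: cs).length : Nat) : Int) = ((((p ++ [pvG c]) ++ cs).length : Nat) : Int) := by
      push_cast; simp
    rw [e1, e2, ih]
    simp

lemma pv_map_take (low : Bool) (cs : List Char) :
    (cs.take (pvRunLen low cs)).map pvG
      = if low then List.replicate (pvRunLen low cs) 'l' else cs.take (pvRunLen low cs) := by
  induction cs with
  | nil => simp [pvRunLen]
  | cons c cs ih =>
    by_cases h : (decide (c.toNat < 108)) == low
    · rw [show pvRunLen low (c :: cs) = 1 + pvRunLen low cs from by rw [pvRunLen, if_pos h]]
      simp only [show 1 + pvRunLen low cs = (pvRunLen low cs) + 1 from by omega,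
        List.take_succ_cons, List.map_cons, List.replicate_succ, ih]
      cases low with
      | true =>
        have hc : c.toNat < 108 := by simpa using h
        simp [pvG, hc]
      | false =>
        have hc : ¬ c.toNat < 108 := by simpa using h
        simp [pvG, hc]
    · rw [show pvRunLen low (c :: cs) = 0 from by rw [pvRunLen, if_neg h]]
      simp

theorem pvChunks_eq (cs : List Char) : pvChunks cs = cs.map pvG := by
  match cs with
  | [] => simp [pvChunks]
  | c :: cs =>
    have ih := pvChunks_eq (cs.drop (pvRunLen (decide (c.toNat < 108)) cs))
    rw [pvChunks]
    simp only [ih]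
    by_cases h : c.toNat < 108
    · simp only [h, decide_true]
      have hm := pv_map_take true cs
      simp only [if_pos rfl] at hm ⊢
      have hmap : (c :: cs).map pvG
          = ('l' :: (cs.take (pvRunLen true cs)).map pvG) ++ (cs.drop (pvRunLen true cs)).map pvG := by
        conv_lhs => rw [show cs = cs.take (pvRunLen true cs) ++ cs.drop (pvRunLen true cs) from
          (List.take_append_drop _ _).symm]
        simp [pvG, h]
      rw [hmap, hm]
      simp [List.replicate_succ, Nat.add_comm]
    · simp only [h, decide_false]
      have hm := pv_map_take false cs
      simp only [if_neg (Bool.false_ne_true)] at hm ⊢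
      have hmap : (c :: cs).map pvG
          = (c :: (cs.take (pvRunLen false cs)).map pvG) ++ (cs.drop (pvRunLen false cs)).map pvG := by
        conv_lhs => rw [show cs = cs.take (pvRunLen false cs) ++ cs.drop (pvRunLen false cs) from
          (List.take_append_drop _ _).symm]
        simp [pvG, h]
      rw [hmap, hm]
termination_by cs.length
decreasing_by simp only [List.length_drop, List.length_cons]; omega

theorem pv_main (myString : String) : solution myString = solution_alt myString := by
  have hA := pv_loopA myString.toList []
  simp only [List.nil_append, List.length_nil, Nat.cast_zero] at hA
  unfold solution solution_alt
  simp only [PySem.Str.len_eq]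
  rw [hA, pvChunks_eq]

-- ===== VERDICT (by name: the statement is the Claim_ definition above) =====
theorem solution_spec : Claim_equal_solution := by
  intro s _
  unfold Spec_solution
  exact pv_main s
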